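-- pv_equiv track=rewrite | github.com/xiaohaoxing/mioj | problem86.py | solution
-- ===== SOURCE A (Python) =====
-- def solution(line):
--     num = int(line)
--     power = 1
--     rule1 = False
--     rule2 = False
--     while(power < num + 2):
--         if num == power + 1:
--             rule1 = True
--         if num == power - 1:
--             rule2 = True
--         power = power * 2
--     if rule1 and rule2:
--         return "Very Good"
--     elif rule1 and (not rule2):
--         return "Good"
--     elif (not rule1) and rule2:
--         return "Bad"
--     else:
--         return "Normal"
-- ===== SOURCE B (Python) =====
-- def ispow(x):
--     return x > 0 and (x & (x - 1)) == 0
--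
--
-- def solution(line):
--     num = int(line)
--     rule1 = ispow(num - 1)
--     rule2 = ispow(num + 1)
--     if rule1 and rule2:
--         return "Very Good"
--     elif rule1 and (not rule2):
--         return "Good"
--     elif (not rule1) and rule2:
--         return "Bad"
--     else:
--         return "Normal"
-- ===== Notes on version B (the rewrite author's own statement) =====
-- stated objective: idiomatic
-- what changed: Replaces A's doubling loop over all powers of two below num+2 (checking num==p+1 and num==p-1 at each step) with the closed-form bit test x > 0 and x & (x-1) == 0 applied to num-1 and num+1.
import Mathlib
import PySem

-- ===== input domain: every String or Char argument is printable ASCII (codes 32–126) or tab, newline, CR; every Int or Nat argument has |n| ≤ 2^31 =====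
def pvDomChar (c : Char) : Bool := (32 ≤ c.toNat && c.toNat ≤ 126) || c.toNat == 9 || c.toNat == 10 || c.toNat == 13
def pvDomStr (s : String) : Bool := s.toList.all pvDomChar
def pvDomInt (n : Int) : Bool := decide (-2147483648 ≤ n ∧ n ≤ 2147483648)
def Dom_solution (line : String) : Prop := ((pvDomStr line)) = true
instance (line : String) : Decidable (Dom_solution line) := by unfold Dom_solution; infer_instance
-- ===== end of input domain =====

-- B replaces A's doubling loop over powers of two with the closed-form bit test x > 0 ∧ x &&& (x-1) = 0 on num-1 and num+1.

-- ===== PORT A =====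
-- while power < num + 2: test num == power+1 / num == power-1, power *= 2
def solLoop (num power : Int) (hp : 0 < power) (r1 r2 : Bool) : Bool × Bool :=
  if power < num + 2 then
    solLoop num (power * 2) (by omega)
      (r1 || decide (num = power + 1)) (r2 || decide (num = power - 1))
  else (r1, r2)
termination_by (num + 2 - power).toNat
decreasing_by omega

def solution (line : String) : String :=
  match PySem.Int.ofStr? line with
  | none => ""  -- int(line) raises ValueError; excluded by Pre_solution
  | some num =>
    let p := solLoop num 1 Int.one_pos false false
    if p.1 && p.2 then "Very Good"
    else if p.1 && !p.2 then "Good"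
    else if !p.1 && p.2 then "Bad"
    else "Normal"

-- ===== PORT B =====
-- x > 0 and (x & (x - 1)) == 0
def ispow (x : Int) : Bool := decide (0 < x) && decide (PySem.Int.band x (x - 1) = 0)

def solution_alt (line : String) : String :=
  match PySem.Int.ofStr? line with
  | none => ""  -- int(line) raises ValueError; excluded by Pre_solution
  | some num =>
    let rule1 := ispow (num - 1)
    let rule2 := ispow (num + 1)
    if rule1 && rule2 then "Very Good"
    else if rule1 && !rule2 then "Good"
    else if !rule1 && rule2 then "Bad"
    else "Normal"

-- ===== PRECONDITION & SPEC =====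
-- Pre_ excludes exactly the lines int() cannot parse, where A raises ValueError:
-- a line is admitted iff, after stripping surrounding whitespace and an optional
-- sign, it is a nonempty run of digits with single underscores between digits.
def pvIsSpace (c : Char) : Bool := c = ' ' || c = '\t' || c = '\n' || c = '\r' || c.toNat = 11 || c.toNat = 12

def digitTail : List Char → Bool
  | [] => true
  | ['_'] => false
  | '_' :: c :: r => c.isDigit && digitTail r
  | c :: r => c.isDigit && digitTail r

def intShape : List Char → Bool
  | [] => false
  | c :: r => c.isDigit && digitTail r

def Pre_solution (line : String) : Prop :=
  (match ((line.toList.dropWhile pvIsSpace).reverse.dropWhile pvIsSpace).reverse with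
   | '+' :: r => intShape r
   | '-' :: r => intShape r
   | r => intShape r) = true
instance (line : String) : Decidable (Pre_solution line) := by unfold Pre_solution; infer_instance
def pvWitness_solution : String := "3"

def Spec_solution (line : String) (out : String) : Prop := out = solution_alt line
instance (line : String) (out : String) : Decidable (Spec_solution line out) := by unfold Spec_solution; infer_instance

-- ===== CLAIM (what is proved, stated in full; the proofs are below) =====
def Claim_equal_solution : Prop := ∀ (line : String), Dom_solution line → Pre_solution line → Spec_solution line (solution line)

-- ===== LEMMAS AND PROOFS =====

-- x & (x-1) == 0 characterises powers of two among positive naturals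
lemma nat_land_pred_eq_zero_iff (m : ℕ) (hm : 0 < m) :
    (m &&& (m - 1) = 0 ↔ ∃ k : ℕ, m = 2 ^ k) := by
  induction m using Nat.strong_induction_on with
  | _ m ih =>
    rcases Nat.even_or_odd m with ⟨j, hj⟩ | ⟨j, hj⟩
    · -- m = 2*j, j ≥ 1
      have hj1 : 1 ≤ j := by omega
      have hbm : m = Nat.bit false j := by simp [Nat.bit]; omega
      have hbm1 : m - 1 = Nat.bit true (j - 1) := by simp [Nat.bit]; omega
      rw [hbm1, hbm, Nat.land_bit]
      have hIH := ih j (by omega) (by omega)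
      constructor
      · intro h
        have hz : j &&& (j - 1) = 0 := by simpa [Nat.bit] using h
        obtain ⟨k, hk⟩ := hIH.mp hz
        refine ⟨k + 1, ?_⟩
        simp only [Nat.bit, cond, pow_succ]
        omega
      · rintro ⟨k, hk⟩
        simp only [Nat.bit, cond] at hk ⊢
        match k with
        | 0 => omega
        | k + 1 =>
          rw [pow_succ] at hk
          have hj2 : j = 2 ^ k := by omega
          have hz := hIH.mpr ⟨k, hj2⟩
          simp [hz]
    · -- m = 2*j + 1
      have hbm : m = Nat.bit true j := by simp [Nat.bit]; omega
      have hbm1 : m - 1 = Nat.bit false j := by simp [Nat.bit]; omega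
      rw [hbm1, hbm, Nat.land_bit]
      rcases Nat.eq_zero_or_pos j with h0 | hjpos
      · subst h0
        constructor
        · intro _; exact ⟨0, by decide⟩
        · intro _; decide
      · constructor
        · intro h
          have h2 : (2 * (j &&& j) : ℕ) = 0 := by simpa [Nat.bit] using h
          rw [Nat.and_self] at h2
          omega
        · rintro ⟨k, hk⟩
          simp only [Nat.bit, cond] at hk
          match k with
          | 0 => omega
          | k + 1 =>
            exfalso
            have : (2 : ℕ) ∣ 2 ^ (k + 1) := dvd_pow_self 2 (Nat.succ_ne_zero k)
            omega

lemma ispow_iff (x : Int) : ispow x = true ↔ ∃ k : ℕ, x = 2 ^ k := by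
  unfold ispow
  rcases le_or_gt x 0 with hx | hx
  · simp only [Bool.and_eq_true, decide_eq_true_iff]
    constructor
    · rintro ⟨h, -⟩; omega
    · rintro ⟨k, hk⟩
      exfalso
      have : (0 : Int) < 2 ^ k := by positivity
      omega
  · have hband : PySem.Int.band x (x - 1) = ((x.toNat &&& (x - 1).toNat : ℕ) : Int) :=
      PySem.Int.band_of_nonneg (by omega) (by omega)
    have htn : (x - 1).toNat = x.toNat - 1 := by omega
    simp only [Bool.and_eq_true, decide_eq_true_iff, hband, htn]
    rw [show (((x.toNat &&& (x.toNat - 1) : ℕ) : Int) = 0) ↔ (x.toNat &&& (x.toNat - 1) = 0) from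
      Int.natCast_eq_zero]
    rw [nat_land_pred_eq_zero_iff x.toNat (by omega)]
    constructor
    · rintro ⟨hpos, k, hk⟩
      have hc : ((2 ^ k : ℕ) : Int) = 2 ^ k := by push_cast; ring
      exact ⟨k, by omega⟩
    · rintro ⟨k, hk⟩
      have hc : ((2 ^ k : ℕ) : Int) = 2 ^ k := by push_cast; ring
      have hpos : (0 : Int) < 2 ^ k := by positivity
      exact ⟨by omega, k, by omega⟩

lemma solLoop_fst (num : Int) : ∀ (power : Int) (hp : 0 < power) (r1 r2 : Bool),
    ((solLoop num power hp r1 r2).1 = true ↔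
      (r1 = true ∨ ∃ k : ℕ, num = power * 2 ^ k + 1)) := by
  intro power hp r1 r2
  induction power, hp, r1, r2 using solLoop.induct num with
  | case1 power hp r1 r2 h ih =>
    rw [solLoop, if_pos h]
    rw [ih]
    simp only [Bool.or_eq_true, decide_eq_true_iff]
    constructor
    · rintro ((h1 | h1) | ⟨k, hk⟩)
      · exact Or.inl h1
      · exact Or.inr ⟨0, by simpa using h1⟩
      · exact Or.inr ⟨k + 1, by rw [hk, pow_succ]; ring⟩
    · rintro (h1 | ⟨k, hk⟩)
      · exact Or.inl (Or.inl h1)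
      · match k with
        | 0 => exact Or.inl (Or.inr (by simpa using hk))
        | k + 1 => exact Or.inr ⟨k, by rw [hk, pow_succ]; ring⟩
  | case2 power hp r1 r2 h =>
    rw [solLoop, if_neg h]
    constructor
    · exact Or.inl
    · rintro (h1 | ⟨k, hk⟩)
      · exact h1
      · exfalso
        have h2 : (1 : Int) ≤ 2 ^ k := one_le_pow₀ (by norm_num)
        have : power ≤ power * 2 ^ k := le_mul_of_one_le_right hp.le h2
        omega

lemma solLoop_snd (num : Int) : ∀ (power : Int) (hp : 0 < power) (r1 r2 : Bool),
    ((solLoop num power hp r1 r2).2 = true ↔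
      (r2 = true ∨ ∃ k : ℕ, num = power * 2 ^ k - 1)) := by
  intro power hp r1 r2
  induction power, hp, r1, r2 using solLoop.induct num with
  | case1 power hp r1 r2 h ih =>
    rw [solLoop, if_pos h]
    rw [ih]
    simp only [Bool.or_eq_true, decide_eq_true_iff]
    constructor
    · rintro ((h1 | h1) | ⟨k, hk⟩)
      · exact Or.inl h1
      · exact Or.inr ⟨0, by simpa using h1⟩
      · exact Or.inr ⟨k + 1, by rw [hk, pow_succ]; ring⟩
    · rintro (h1 | ⟨k, hk⟩)
      · exact Or.inl (Or.inl h1)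
      · match k with
        | 0 => exact Or.inl (Or.inr (by simpa using hk))
        | k + 1 => exact Or.inr ⟨k, by rw [hk, pow_succ]; ring⟩
  | case2 power hp r1 r2 h =>
    rw [solLoop, if_neg h]
    constructor
    · exact Or.inl
    · rintro (h1 | ⟨k, hk⟩)
      · exact h1
      · exfalso
        have h2 : (1 : Int) ≤ 2 ^ k := one_le_pow₀ (by norm_num)
        have : power ≤ power * 2 ^ k := le_mul_of_one_le_right hp.le h2
        omega

lemma solLoop_fst_eq_ispow (num : Int) :
    (solLoop num 1 Int.one_pos false false).1 = ispow (num - 1) := by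
  rw [Bool.eq_iff_iff, solLoop_fst, ispow_iff]
  simp only [Bool.false_eq_true, false_or, one_mul]
  exact ⟨fun ⟨k, hk⟩ => ⟨k, by omega⟩, fun ⟨k, hk⟩ => ⟨k, by omega⟩⟩

lemma solLoop_snd_eq_ispow (num : Int) :
    (solLoop num 1 Int.one_pos false false).2 = ispow (num + 1) := by
  rw [Bool.eq_iff_iff, solLoop_snd, ispow_iff]
  simp only [Bool.false_eq_true, false_or, one_mul]
  exact ⟨fun ⟨k, hk⟩ => ⟨k, by omega⟩, fun ⟨k, hk⟩ => ⟨k, by omega⟩⟩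

-- ===== VERDICT (by name: the statement is the Claim_ definition above) =====
theorem solution_spec : Claim_equal_solution := by
  intro line _ _
  unfold Spec_solution solution solution_alt
  cases PySem.Int.ofStr? line with
  | none => rfl
  | some num =>
    simp only [solLoop_fst_eq_ispow, solLoop_snd_eq_ispow]
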